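-- pv_equiv track=rewrite | github.com/WwZzz/ILStudio | data_utils/data_preprocess_scripts/vlaos_rlds_to_h5py.py | generate_interval_list
-- ===== SOURCE A (Python) =====
-- def generate_interval_list(n, indices):
--     result = []
--     indices = sorted(indices)  # 保证输入的list是有序的
--     indices.append(-1)  # 防止超出范围，添加一个标志值用于最后的区间
--
--     for i in range(n):
--         # 找到属于哪个区间
--         for j in range(len(indices) - 1):
--             if i < indices[j]:
--                 result.append(indices[j])
--                 break
--         else:
--             # 如果i落在最后一个区间之外
--             result.append(-1)
--     return result
-- ===== SOURCE B (Python) =====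
-- def generate_interval_list(n, indices):
--     s = sorted(indices)
--     m = len(s)
--     p = 0
--     result = []
--     for i in range(n):
--         while p < m and s[p] <= i:
--             p += 1
--         result.append(s[p] if p < m else -1)
--     return result
-- ===== Notes on version B (the rewrite author's own statement) =====
-- stated objective: faster
-- what changed: Replaces A's inner linear scan over all sorted indices for every i by a single two-pointer sweep: since i increases, one pointer advances monotonically through the sorted list, so each index is passed at most once.
import Mathlib
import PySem

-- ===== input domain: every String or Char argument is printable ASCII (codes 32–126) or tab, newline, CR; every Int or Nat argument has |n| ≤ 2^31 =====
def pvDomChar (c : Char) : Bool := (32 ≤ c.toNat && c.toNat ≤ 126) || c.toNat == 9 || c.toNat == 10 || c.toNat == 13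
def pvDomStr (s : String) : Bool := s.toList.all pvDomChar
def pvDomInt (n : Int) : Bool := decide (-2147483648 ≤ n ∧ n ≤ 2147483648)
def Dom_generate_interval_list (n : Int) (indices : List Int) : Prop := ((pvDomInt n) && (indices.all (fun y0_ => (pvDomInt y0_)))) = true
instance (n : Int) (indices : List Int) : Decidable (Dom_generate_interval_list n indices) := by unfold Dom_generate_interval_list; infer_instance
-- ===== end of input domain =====

-- ===== PORT A =====
-- B replaces A's per-i inner scan over the sorted list by a single two-pointer sweep (objective: faster).
-- inner 'for j in range(len(indices)-1): if i < indices[j]: append; break / else: append(-1)'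
-- as the obvious structural recursion over the scanned prefix (all of indices but the sentinel)
def pvInnerA (i : Int) : List Int → Int
  | [] => -1
  | x :: xs => if i < x then x else pvInnerA i xs

def generate_interval_list (n : Int) (indices : List Int) : List Int :=
  let inds := (PySem.List.sorted indices (fun x => x) false) ++ [-1]
  (PySem.List.pyRange 0 n 1).foldl (fun result i => result ++ [pvInnerA i inds.dropLast]) []

-- ===== PORT B =====
-- two-pointer sweep: s is the not-yet-passed suffix of the sorted list; the while-advance is dropWhile
def pvLoopB (s : List Int) : List Int → List Int
  | [] => []
  | i :: rest =>
    let s' := s.dropWhile (fun x => x ≤ i)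
    (match s' with | [] => -1 | x :: _ => x) :: pvLoopB s' rest

def generate_interval_list_alt (n : Int) (indices : List Int) : List Int :=
  pvLoopB (PySem.List.sorted indices (fun x => x) false) (PySem.List.pyRange 0 n 1)

-- ===== PRECONDITION & SPEC =====
def Spec_generate_interval_list (n : Int) (indices : List Int) (out : List Int) : Prop := out = generate_interval_list_alt n indices
instance (n : Int) (indices : List Int) (out : List Int) : Decidable (Spec_generate_interval_list n indices out) := by unfold Spec_generate_interval_list; infer_instance

-- ===== CLAIM (what is proved, stated in full; the proofs are below) =====
def Claim_equal_generate_interval_list : Prop := ∀ (n : Int) (indices : List Int), Dom_generate_interval_list n indices → Spec_generate_interval_list n indices (generate_interval_list n indices)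

-- ===== LEMMAS AND PROOFS =====

theorem pvInnerA_eq_headD (i : Int) (s : List Int) :
    pvInnerA i s = (s.dropWhile (fun x => x ≤ i)).headD (-1) := by
  induction s with
  | nil => simp [pvInnerA]
  | cons x xs ih =>
    by_cases h : i < x
    · simp [pvInnerA, h, List.dropWhile, not_le.mpr h]
    · simp [pvInnerA, h, List.dropWhile, not_lt.mp h, ih]

theorem pvDropWhile_dropWhile (i j : Int) (h : i ≤ j) (s : List Int) :
    ((s.dropWhile (fun x => x ≤ i)).dropWhile (fun x => x ≤ j)) = s.dropWhile (fun x => x ≤ j) := by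
  induction s with
  | nil => simp
  | cons x xs ih =>
    by_cases hx : x ≤ i
    · simp [List.dropWhile, hx, hx.trans h, ih]
    · simp [List.dropWhile, hx]

theorem pvLoopB_eq (is : List Int) (hp : is.Pairwise (· ≤ ·)) :
    ∀ s : List Int, pvLoopB s is = is.map (fun i => (s.dropWhile (fun x => x ≤ i)).headD (-1)) := by
  induction is with
  | nil => intro s; simp [pvLoopB]
  | cons i rest ih =>
    intro s
    rcases List.pairwise_cons.mp hp with ⟨hle, hrest⟩
    have hmap : rest.map (fun j => ((s.dropWhile (fun x => x ≤ i)).dropWhile (fun x => x ≤ j)).headD (-1))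
        = rest.map (fun j => (s.dropWhile (fun x => x ≤ j)).headD (-1)) :=
      List.map_congr_left (fun j hj => by rw [pvDropWhile_dropWhile i j (hle j hj)])
    have hstep : pvLoopB s (i :: rest)
        = (s.dropWhile (fun x => x ≤ i)).headD (-1) :: pvLoopB (s.dropWhile (fun x => x ≤ i)) rest := by
      cases hs : s.dropWhile (fun x => x ≤ i) <;> simp [pvLoopB, hs]
    rw [hstep, ih hrest, hmap, List.map_cons]

theorem pvFoldl_append_map (f : Int → Int) (l : List Int) :
    ∀ acc : List Int, l.foldl (fun r i => r ++ [f i]) acc = acc ++ l.map f := by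
  induction l with
  | nil => simp
  | cons x xs ih => intro acc; simp [ih]

-- ===== VERDICT (by name: the statement is the Claim_ definition above) =====
theorem generate_interval_list_spec : Claim_equal_generate_interval_list := by
  intro n indices _
  unfold Spec_generate_interval_list generate_interval_list generate_interval_list_alt
  have hpair : (PySem.List.pyRange 0 n 1).Pairwise (· ≤ ·) :=
    (PySem.List.pairwise_lt_pyRange_one 0 n).imp (fun h => le_of_lt h)
  simp only [List.dropLast_append_cons, List.dropLast_singleton, List.append_nil]
  rw [pvFoldl_append_map, pvLoopB_eq _ hpair]
  simp [pvInnerA_eq_headD]
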